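-- pv_equiv track=rewrite | github.com/josephy02/HardPerf | training_recommendations.py | _prioritize_and_deduplicate
-- ===== SOURCE A (Python) =====
-- from typing import Dict, List, Optional, Any
--
-- def _prioritize_and_deduplicate(recommendations: List[Dict]) -> List[Dict]:
--     """Sort recommendations by priority and remove duplicates."""
--     # Remove duplicates based on title
--     seen_titles = set()
--     unique_recommendations = []
--
--     for rec in recommendations:
--         title = rec.get("title", "")
--         if title not in seen_titles:
--             unique_recommendations.append(rec)
--             seen_titles.add(title)
--
--     # Sort by priority (critical first, then info, then others)
--     def priority_sort_key(rec):
--         priority = rec.get("priority", "low")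
--         if priority == "critical":
--             return -2  # Critical messages first
--         elif priority == "info":
--             return -1  # Info messages second
--         priority_order = {"high": 1, "medium": 2, "low": 3}
--         return priority_order.get(priority, 4)
--
--     unique_recommendations.sort(key=priority_sort_key)
--
--     return unique_recommendations
-- ===== SOURCE B (Python) =====
-- def _prioritize_and_deduplicate(recommendations):
--     """One pass: dedup by title and distribute into fixed priority buckets, then concatenate."""
--     seen_titles = set()
--     crit, info, high, med, low, other = [], [], [], [], [], []
--     for rec in recommendations:
--         title = rec.get("title", "")
--         if title in seen_titles:
--             continue
--         seen_titles.add(title)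
--         p = rec.get("priority", "low")
--         if p == "critical":
--             crit.append(rec)
--         elif p == "info":
--             info.append(rec)
--         elif p == "high":
--             high.append(rec)
--         elif p == "medium":
--             med.append(rec)
--         elif p == "low":
--             low.append(rec)
--         else:
--             other.append(rec)
--     return crit + info + high + med + low + other
-- ===== Notes on version B (the rewrite author's own statement) =====
-- stated objective: alternative
-- what changed: Replaces the stable sort by priority key with a single-pass bucket distribution into six fixed priority buckets (critical, info, high, medium, low, other), concatenated in rank order; dedup and bucketing are fused into one pass.
import Mathlib
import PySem

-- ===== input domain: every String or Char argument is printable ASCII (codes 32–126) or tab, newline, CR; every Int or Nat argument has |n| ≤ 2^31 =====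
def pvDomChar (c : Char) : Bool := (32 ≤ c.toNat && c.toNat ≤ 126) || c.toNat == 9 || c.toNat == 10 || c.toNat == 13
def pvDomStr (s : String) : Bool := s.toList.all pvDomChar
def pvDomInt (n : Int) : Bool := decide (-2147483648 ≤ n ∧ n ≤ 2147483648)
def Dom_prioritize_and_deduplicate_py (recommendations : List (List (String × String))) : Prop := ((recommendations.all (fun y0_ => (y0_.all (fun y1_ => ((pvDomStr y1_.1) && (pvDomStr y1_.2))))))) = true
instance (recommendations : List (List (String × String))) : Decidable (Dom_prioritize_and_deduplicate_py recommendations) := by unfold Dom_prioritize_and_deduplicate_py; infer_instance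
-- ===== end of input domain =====

-- B replaces A's stable sort by priority key with a single pass that deduplicates and
-- distributes records into six fixed priority buckets, concatenated in rank order (alternative algorithm).

-- ===== PORT A =====
-- priority_sort_key (inner helper of A)
def pvKeyA (rec : List (String × String)) : Int :=
  let priority := (PySem.Dict.mk rec).getD "priority" "low"
  if priority == "critical" then -2
  else if priority == "info" then -1
  else (PySem.Dict.mk [("high", (1 : Int)), ("medium", 2), ("low", 3)]).getD priority 4

-- the body of A's dedup loop
def pvStepA (st : PySem.Set String × List (List (String × String))) (rec : List (String × String)) :
    PySem.Set String × List (List (String × String)) :=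
  let title := (PySem.Dict.mk rec).getD "title" ""
  if st.1.contains title then st
  else (PySem.Set.add st.1 title, st.2 ++ [rec])

def prioritize_and_deduplicate_py (recommendations : List (List (String × String))) : List (List (String × String)) :=
  let st := recommendations.foldl pvStepA (PySem.Set.empty, [])
  PySem.List.sorted st.2 pvKeyA false

-- ===== PORT B =====
-- the body of B's single fused loop: skip seen titles, else append to the record's bucket
def pvStepB
    (st : PySem.Set String × List (List (String × String)) × List (List (String × String)) ×
          List (List (String × String)) × List (List (String × String)) ×
          List (List (String × String)) × List (List (String × String)))
    (rec : List (String × String)) :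
    PySem.Set String × List (List (String × String)) × List (List (String × String)) ×
          List (List (String × String)) × List (List (String × String)) ×
          List (List (String × String)) × List (List (String × String)) :=
  let title := (PySem.Dict.mk rec).getD "title" ""
  if st.1.contains title then st
  else
    let seen := PySem.Set.add st.1 title
    let p := (PySem.Dict.mk rec).getD "priority" "low"
    if p == "critical" then (seen, st.2.1 ++ [rec], st.2.2.1, st.2.2.2.1, st.2.2.2.2.1, st.2.2.2.2.2.1, st.2.2.2.2.2.2)
    else if p == "info" then (seen, st.2.1, st.2.2.1 ++ [rec], st.2.2.2.1, st.2.2.2.2.1, st.2.2.2.2.2.1, st.2.2.2.2.2.2)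
    else if p == "high" then (seen, st.2.1, st.2.2.1, st.2.2.2.1 ++ [rec], st.2.2.2.2.1, st.2.2.2.2.2.1, st.2.2.2.2.2.2)
    else if p == "medium" then (seen, st.2.1, st.2.2.1, st.2.2.2.1, st.2.2.2.2.1 ++ [rec], st.2.2.2.2.2.1, st.2.2.2.2.2.2)
    else if p == "low" then (seen, st.2.1, st.2.2.1, st.2.2.2.1, st.2.2.2.2.1, st.2.2.2.2.2.1 ++ [rec], st.2.2.2.2.2.2)
    else (seen, st.2.1, st.2.2.1, st.2.2.2.1, st.2.2.2.2.1, st.2.2.2.2.2.1, st.2.2.2.2.2.2 ++ [rec])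

def prioritize_and_deduplicate_py_alt (recommendations : List (List (String × String))) : List (List (String × String)) :=
  let st := recommendations.foldl pvStepB (PySem.Set.empty, [], [], [], [], [], [])
  st.2.1 ++ st.2.2.1 ++ st.2.2.2.1 ++ st.2.2.2.2.1 ++ st.2.2.2.2.2.1 ++ st.2.2.2.2.2.2

-- ===== PRECONDITION & SPEC =====
def Spec_prioritize_and_deduplicate_py (recommendations : List (List (String × String))) (out : List (List (String × String))) : Prop := out = prioritize_and_deduplicate_py_alt recommendations
instance (recommendations : List (List (String × String))) (out : List (List (String × String))) : Decidable (Spec_prioritize_and_deduplicate_py recommendations out) := by unfold Spec_prioritize_and_deduplicate_py; infer_instance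

-- ===== CLAIM (what is proved, stated in full; the proofs are below) =====
def Claim_equal_prioritize_and_deduplicate_py : Prop := ∀ (recommendations : List (List (String × String))), Dom_prioritize_and_deduplicate_py recommendations → Spec_prioritize_and_deduplicate_py recommendations (prioritize_and_deduplicate_py recommendations)

-- ===== LEMMAS AND PROOFS =====

-- A's dedup loop only ever appends to its list accumulator
lemma pv_foldA_acc (xs : List (List (String × String))) :
    ∀ (s : PySem.Set String) (u : List (List (String × String))),
    List.foldl pvStepA (s, u) xs =
      ((List.foldl pvStepA (s, []) xs).1, u ++ (List.foldl pvStepA (s, []) xs).2) := by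
  induction xs with
  | nil => intro s u; simp
  | cons r xs ih =>
    intro s u
    by_cases h : ((PySem.Dict.mk r).getD "title" "") ∈ s
    · rw [List.foldl_cons, List.foldl_cons,
        show pvStepA (s, u) r = (s, u) from by simp [pvStepA, h],
        show pvStepA (s, []) r = (s, []) from by simp [pvStepA, h]]
      exact ih s u
    · rw [List.foldl_cons, List.foldl_cons,
        show pvStepA (s, u) r = (PySem.Set.add s ((PySem.Dict.mk r).getD "title" ""), u ++ [r]) from by simp [pvStepA, h],
        show pvStepA (s, []) r = (PySem.Set.add s ((PySem.Dict.mk r).getD "title" ""), [r]) from by simp [pvStepA, h],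
        ih _ (u ++ [r]), ih _ [r]]
      simp

-- pvKeyA written as one if-chain on the record's priority
lemma pvKeyA_spec (rec : List (String × String)) :
    pvKeyA rec =
      (let p := (PySem.Dict.mk rec).getD "priority" "low"
       if p == "critical" then -2 else if p == "info" then -1
       else if p == "high" then 1 else if p == "medium" then 2
       else if p == "low" then 3 else 4) := by
  unfold pvKeyA
  set p := (PySem.Dict.mk rec).getD "priority" "low" with hp
  by_cases h1 : (p == "critical") = true
  · simp [h1]
  by_cases h2 : (p == "info") = true
  · simp [h1, h2]
  by_cases h3 : (p == "high") = true
  · simp only [beq_iff_eq] at h3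
    simp [h1, h2, h3, PySem.Dict.getD, PySem.Dict.get?_mk_cons, PySem.Dict.get?]
  by_cases h4 : (p == "medium") = true
  · simp only [beq_iff_eq] at h4
    simp [h1, h2, h4, PySem.Dict.getD, PySem.Dict.get?_mk_cons, PySem.Dict.get?]
  by_cases h5 : (p == "low") = true
  · simp only [beq_iff_eq] at h5
    simp [h1, h2, h5, PySem.Dict.getD, PySem.Dict.get?_mk_cons, PySem.Dict.get?]
  · simp only [beq_iff_eq] at h1 h2 h3 h4 h5
    simp [h1, h2, h3, h4, h5, PySem.Dict.getD, PySem.Dict.get?_mk_cons, PySem.Dict.get?,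
      (show ¬ ("high" = p) from fun hh => h3 hh.symm),
      (show ¬ ("medium" = p) from fun hh => h4 hh.symm),
      (show ¬ ("low" = p) from fun hh => h5 hh.symm)]

-- pvKeyA takes only the six bucket values
lemma pvKeyA_cases (rec : List (String × String)) :
    pvKeyA rec = -2 ∨ pvKeyA rec = -1 ∨ pvKeyA rec = 1 ∨ pvKeyA rec = 2 ∨ pvKeyA rec = 3 ∨ pvKeyA rec = 4 := by
  rw [pvKeyA_spec]
  dsimp only
  split_ifs <;> simp

-- B's fused loop computes, per bucket, the key-v records of A's deduplicated list
lemma pv_foldB_spec (xs : List (List (String × String))) :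
    ∀ (s : PySem.Set String) (c i h m l o : List (List (String × String))),
    List.foldl pvStepB (s, c, i, h, m, l, o) xs =
      ((List.foldl pvStepA (s, []) xs).1,
       c ++ (List.foldl pvStepA (s, []) xs).2.filter (fun r => pvKeyA r == -2),
       i ++ (List.foldl pvStepA (s, []) xs).2.filter (fun r => pvKeyA r == -1),
       h ++ (List.foldl pvStepA (s, []) xs).2.filter (fun r => pvKeyA r == 1),
       m ++ (List.foldl pvStepA (s, []) xs).2.filter (fun r => pvKeyA r == 2),
       l ++ (List.foldl pvStepA (s, []) xs).2.filter (fun r => pvKeyA r == 3),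
       o ++ (List.foldl pvStepA (s, []) xs).2.filter (fun r => pvKeyA r == 4)) := by
  induction xs with
  | nil => intro s c i h m l o; simp
  | cons r xs ih =>
    intro s c i h m l o
    by_cases hseen : ((PySem.Dict.mk r).getD "title" "") ∈ s
    · rw [List.foldl_cons, List.foldl_cons,
        show pvStepB (s, c, i, h, m, l, o) r = (s, c, i, h, m, l, o) from by
          simp [pvStepB, hseen],
        show pvStepA (s, []) r = (s, []) from by simp [pvStepA, hseen]]
      exact ih s c i h m l o
    · rw [List.foldl_cons, List.foldl_cons,
        show pvStepA (s, []) r = (PySem.Set.add s ((PySem.Dict.mk r).getD "title" ""), [r]) from by simp [pvStepA, hseen],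
        pv_foldA_acc xs _ [r]]
      set p := (PySem.Dict.mk r).getD "priority" "low" with hp
      by_cases h1 : (p == "critical") = true
      · have hk : pvKeyA r = -2 := by rw [pvKeyA_spec, ← hp]; simp [h1]
        rw [show pvStepB (s, c, i, h, m, l, o) r =
            (PySem.Set.add s ((PySem.Dict.mk r).getD "title" ""), c ++ [r], i, h, m, l, o) from by
          simp [pvStepB, hseen, ← hp, h1]]
        simp [ih, hk, List.filter_cons]
      by_cases h2 : (p == "info") = true
      · have hk : pvKeyA r = -1 := by rw [pvKeyA_spec, ← hp]; simp [h1, h2]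
        rw [show pvStepB (s, c, i, h, m, l, o) r =
            (PySem.Set.add s ((PySem.Dict.mk r).getD "title" ""), c, i ++ [r], h, m, l, o) from by
          simp [pvStepB, hseen, ← hp, h1, h2]]
        simp [ih, hk, List.filter_cons]
      by_cases h3 : (p == "high") = true
      · have hk : pvKeyA r = 1 := by rw [pvKeyA_spec, ← hp]; simp [h1, h2, h3]
        rw [show pvStepB (s, c, i, h, m, l, o) r =
            (PySem.Set.add s ((PySem.Dict.mk r).getD "title" ""), c, i, h ++ [r], m, l, o) from by
          simp [pvStepB, hseen, ← hp, h1, h2, h3]]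
        simp [ih, hk, List.filter_cons]
      by_cases h4 : (p == "medium") = true
      · have hk : pvKeyA r = 2 := by rw [pvKeyA_spec, ← hp]; simp [h1, h2, h3, h4]
        rw [show pvStepB (s, c, i, h, m, l, o) r =
            (PySem.Set.add s ((PySem.Dict.mk r).getD "title" ""), c, i, h, m ++ [r], l, o) from by
          simp [pvStepB, hseen, ← hp, h1, h2, h3, h4]]
        simp [ih, hk, List.filter_cons]
      by_cases h5 : (p == "low") = true
      · have hk : pvKeyA r = 3 := by rw [pvKeyA_spec, ← hp]; simp [h1, h2, h3, h4, h5]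
        rw [show pvStepB (s, c, i, h, m, l, o) r =
            (PySem.Set.add s ((PySem.Dict.mk r).getD "title" ""), c, i, h, m, l ++ [r], o) from by
          simp [pvStepB, hseen, ← hp, h1, h2, h3, h4, h5]]
        simp [ih, hk, List.filter_cons]
      · have hk : pvKeyA r = 4 := by rw [pvKeyA_spec, ← hp]; simp [h1, h2, h3, h4, h5]
        rw [show pvStepB (s, c, i, h, m, l, o) r =
            (PySem.Set.add s ((PySem.Dict.mk r).getD "title" ""), c, i, h, m, l, o ++ [r]) from by
          simp [pvStepB, hseen, ← hp, h1, h2, h3, h4, h5]]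
        simp [ih, hk, List.filter_cons]

-- inserting x after every element with key ≤ key x and before every strictly larger one
lemma pv_insertBy_middle {α : Type} (k : α → Int) (x : α) (L R : List α)
    (hL : ∀ y ∈ L, ¬ k x < k y) (hR : ∀ y ∈ R, k x < k y) :
    PySem.List.insertBy (fun a b => decide (k a < k b)) x (L ++ R) = L ++ x :: R := by
  induction L with
  | nil =>
    cases R with
    | nil => simp [PySem.List.insertBy]
    | cons r R => simp [PySem.List.insertBy, hR r (by simp)]
  | cons y L ih =>
    have hy : ¬ k x < k y := hL y (by simp)
    simp only [List.cons_append, PySem.List.insertBy, decide_eq_true_eq, if_neg hy]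
    rw [ih (fun z hz => hL z (by simp [hz]))]

-- a stable sort under a six-valued key is the concatenation of the six key-filters
lemma pv_sorted_six {α : Type} (k : α → Int)
    (hk : ∀ x : α, k x = -2 ∨ k x = -1 ∨ k x = 1 ∨ k x = 2 ∨ k x = 3 ∨ k x = 4)
    (xs : List α) :
    PySem.List.sorted xs k false =
      xs.filter (fun x => k x == -2) ++ xs.filter (fun x => k x == -1) ++
      xs.filter (fun x => k x == 1) ++ xs.filter (fun x => k x == 2) ++
      xs.filter (fun x => k x == 3) ++ xs.filter (fun x => k x == 4) := by
  induction xs using List.reverseRecOn with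
  | nil => simp [PySem.List.sorted]
  | append_singleton xs x ih =>
    rw [PySem.List.sorted_eq_foldl_insertBy, List.foldl_append,
      ← PySem.List.sorted_eq_foldl_insertBy, ih]
    simp only [List.foldl_cons, List.foldl_nil]
    have hmem : ∀ (v : Int) (y : α), y ∈ xs.filter (fun z => k z == v) → k y = v := by
      intro v y hy
      have := List.of_mem_filter hy
      simpa using this
    rcases hk x with hx | hx | hx | hx | hx | hx
    · rw [show xs.filter (fun z => k z == -2) ++ xs.filter (fun z => k z == -1) ++
          xs.filter (fun z => k z == 1) ++ xs.filter (fun z => k z == 2) ++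
          xs.filter (fun z => k z == 3) ++ xs.filter (fun z => k z == 4) =
          (xs.filter (fun z => k z == -2)) ++
          (xs.filter (fun z => k z == -1) ++ xs.filter (fun z => k z == 1) ++
           xs.filter (fun z => k z == 2) ++ xs.filter (fun z => k z == 3) ++
           xs.filter (fun z => k z == 4)) from by simp [List.append_assoc],
        pv_insertBy_middle k x _ _
          (by intro y hy; have := hmem (-2) y hy; omega)
          (by intro y hy; simp only [List.append_assoc, List.mem_append] at hy
              rcases hy with h | h | h | h | h
              all_goals (first
                | (have := hmem (-1) y h; omega) | (have := hmem 1 y h; omega)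
                | (have := hmem 2 y h; omega) | (have := hmem 3 y h; omega)
                | (have := hmem 4 y h; omega)))]
      simp [List.filter_append, hx, List.append_assoc]
    · rw [show xs.filter (fun z => k z == -2) ++ xs.filter (fun z => k z == -1) ++
          xs.filter (fun z => k z == 1) ++ xs.filter (fun z => k z == 2) ++
          xs.filter (fun z => k z == 3) ++ xs.filter (fun z => k z == 4) =
          (xs.filter (fun z => k z == -2) ++ xs.filter (fun z => k z == -1)) ++
          (xs.filter (fun z => k z == 1) ++
           xs.filter (fun z => k z == 2) ++ xs.filter (fun z => k z == 3) ++
           xs.filter (fun z => k z == 4)) from by simp [List.append_assoc],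
        pv_insertBy_middle k x _ _
          (by intro y hy; simp only [List.mem_append] at hy
              rcases hy with h | h
              · have := hmem (-2) y h; omega
              · have := hmem (-1) y h; omega)
          (by intro y hy; simp only [List.append_assoc, List.mem_append] at hy
              rcases hy with h | h | h | h
              all_goals (first
                | (have := hmem 1 y h; omega) | (have := hmem 2 y h; omega)
                | (have := hmem 3 y h; omega) | (have := hmem 4 y h; omega)))]
      simp [List.filter_append, hx, List.append_assoc]
    · rw [show xs.filter (fun z => k z == -2) ++ xs.filter (fun z => k z == -1) ++
          xs.filter (fun z => k z == 1) ++ xs.filter (fun z => k z == 2) ++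
          xs.filter (fun z => k z == 3) ++ xs.filter (fun z => k z == 4) =
          (xs.filter (fun z => k z == -2) ++ xs.filter (fun z => k z == -1) ++
           xs.filter (fun z => k z == 1)) ++
          (xs.filter (fun z => k z == 2) ++ xs.filter (fun z => k z == 3) ++
           xs.filter (fun z => k z == 4)) from by simp [List.append_assoc],
        pv_insertBy_middle k x _ _
          (by intro y hy; simp only [List.append_assoc, List.mem_append] at hy
              rcases hy with h | h | h
              all_goals (first
                | (have := hmem (-2) y h; omega) | (have := hmem (-1) y h; omega)
                | (have := hmem 1 y h; omega)))
          (by intro y hy; simp only [List.append_assoc, List.mem_append] at hy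
              rcases hy with h | h | h
              all_goals (first
                | (have := hmem 2 y h; omega)
                | (have := hmem 3 y h; omega) | (have := hmem 4 y h; omega)))]
      simp [List.filter_append, hx, List.append_assoc]
    · rw [show xs.filter (fun z => k z == -2) ++ xs.filter (fun z => k z == -1) ++
          xs.filter (fun z => k z == 1) ++ xs.filter (fun z => k z == 2) ++
          xs.filter (fun z => k z == 3) ++ xs.filter (fun z => k z == 4) =
          (xs.filter (fun z => k z == -2) ++ xs.filter (fun z => k z == -1) ++
           xs.filter (fun z => k z == 1) ++ xs.filter (fun z => k z == 2)) ++
          (xs.filter (fun z => k z == 3) ++ xs.filter (fun z => k z == 4)) from by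
            simp [List.append_assoc],
        pv_insertBy_middle k x _ _
          (by intro y hy; simp only [List.append_assoc, List.mem_append] at hy
              rcases hy with h | h | h | h
              all_goals (first
                | (have := hmem (-2) y h; omega) | (have := hmem (-1) y h; omega)
                | (have := hmem 1 y h; omega) | (have := hmem 2 y h; omega)))
          (by intro y hy; simp only [List.mem_append] at hy
              rcases hy with h | h
              · have := hmem 3 y h; omega
              · have := hmem 4 y h; omega)]
      simp [List.filter_append, hx, List.append_assoc]
    · rw [show xs.filter (fun z => k z == -2) ++ xs.filter (fun z => k z == -1) ++
          xs.filter (fun z => k z == 1) ++ xs.filter (fun z => k z == 2) ++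
          xs.filter (fun z => k z == 3) ++ xs.filter (fun z => k z == 4) =
          (xs.filter (fun z => k z == -2) ++ xs.filter (fun z => k z == -1) ++
           xs.filter (fun z => k z == 1) ++ xs.filter (fun z => k z == 2) ++
           xs.filter (fun z => k z == 3)) ++ (xs.filter (fun z => k z == 4)) from by
            simp [List.append_assoc],
        pv_insertBy_middle k x _ _
          (by intro y hy; simp only [List.append_assoc, List.mem_append] at hy
              rcases hy with h | h | h | h | h
              all_goals (first
                | (have := hmem (-2) y h; omega) | (have := hmem (-1) y h; omega)
                | (have := hmem 1 y h; omega) | (have := hmem 2 y h; omega)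
                | (have := hmem 3 y h; omega)))
          (by intro y hy; have := hmem 4 y hy; omega)]
      simp [List.filter_append, hx, List.append_assoc]
    · rw [show xs.filter (fun z => k z == -2) ++ xs.filter (fun z => k z == -1) ++
          xs.filter (fun z => k z == 1) ++ xs.filter (fun z => k z == 2) ++
          xs.filter (fun z => k z == 3) ++ xs.filter (fun z => k z == 4) =
          (xs.filter (fun z => k z == -2) ++ xs.filter (fun z => k z == -1) ++
           xs.filter (fun z => k z == 1) ++ xs.filter (fun z => k z == 2) ++
           xs.filter (fun z => k z == 3) ++ xs.filter (fun z => k z == 4)) ++ ([] : List α)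
          from by simp,
        pv_insertBy_middle k x _ _
          (by intro y hy; simp only [List.append_assoc, List.mem_append] at hy
              rcases hy with h | h | h | h | h | h
              all_goals (first
                | (have := hmem (-2) y h; omega) | (have := hmem (-1) y h; omega)
                | (have := hmem 1 y h; omega) | (have := hmem 2 y h; omega)
                | (have := hmem 3 y h; omega) | (have := hmem 4 y h; omega)))
          (by intro y hy; simp at hy)]
      simp [List.filter_append, hx, List.append_assoc]

-- ===== VERDICT (by name: the statement is the Claim_ definition above) =====
theorem prioritize_and_deduplicate_py_spec : Claim_equal_prioritize_and_deduplicate_py := by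
  intro recommendations _
  unfold Spec_prioritize_and_deduplicate_py prioritize_and_deduplicate_py prioritize_and_deduplicate_py_alt
  rw [pv_foldB_spec]
  simp only []
  rw [pv_sorted_six pvKeyA pvKeyA_cases]
  simp [List.append_assoc]
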